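-- pv_equiv track=rewrite | github.com/PAWCIOGAA/ASD | DYNAMIC_PROGRAMMING/Lesson_2/Spadajace_klocki.py | Klocki
-- ===== SOURCE A (Python) =====
-- def MiesciSie(A,C):
--     a,b = A
--     a1,b1 = C
--
--     if a1>= a and b1 <= b:
--         return True
--     return False
--
-- def Klocki(T):
--     n = len(T)
--     DP = [[0]*n for _ in range(n)]
--
--     for i in range(n):
--         DP[0][i] = 1
--         DP[i][0] = 1
--         if MiesciSie(T[0],T[1]):
--             DP[1][i] = 2
--         else:DP[1][i] = 1
--
--
--     for i in range(1,n):
--         for j in range(1,n):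
--             for k in range(i):
--                 DP[i][j] = max(DP[i][j-1],DP[i-1][j])
--                 if MiesciSie(T[i],T[k]):
--                     DP[i][j] = max(DP[i][j],DP[k][j-1])
--     return n - DP[n-1][n-1]
-- ===== SOURCE B (Python) =====
-- def Klocki(T):
--     # A's DP recurrence only takes maxima of already-computed entries and never
--     # adds 1, so every entry of the table ends up equal to 1 (for len(T) >= 2)
--     # and the result collapses to the closed form len(T) - 1.
--     return len(T) - 1
-- ===== Notes on version B (the rewrite author's own statement) =====
-- stated objective: faster
-- what changed: A's O(n^3) triple-loop DP only takes maxima of entries that are all 1 and never increments, so the final table entry is always 1 and the answer is len(T)-1; B returns that closed form directly.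
-- crash fix: A raises IndexError when len(T) < 2 (it reads T[1] during initialisation, and DP[-1][-1] of an empty table for n=0); B returns len(T)-1 there. — e.g. on Klocki([(0, 0)]): A raises IndexError, B returns 0
import Mathlib
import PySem

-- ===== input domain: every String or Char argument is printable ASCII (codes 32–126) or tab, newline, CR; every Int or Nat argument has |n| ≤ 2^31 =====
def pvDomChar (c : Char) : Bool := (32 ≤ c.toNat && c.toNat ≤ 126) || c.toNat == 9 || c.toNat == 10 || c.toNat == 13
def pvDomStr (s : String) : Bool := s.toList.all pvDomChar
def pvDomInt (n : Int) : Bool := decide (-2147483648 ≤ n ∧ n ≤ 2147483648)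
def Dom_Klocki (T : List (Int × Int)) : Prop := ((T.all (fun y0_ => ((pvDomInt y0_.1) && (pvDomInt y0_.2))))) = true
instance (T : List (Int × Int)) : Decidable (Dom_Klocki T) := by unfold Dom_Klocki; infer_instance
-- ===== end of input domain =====

-- B change (honest one line): A's DP only takes maxima of entries that are all 1 and never
-- increments, so its result is always len(T)-1 (for len(T) ≥ 2); B returns that closed form.

-- ===== PORT A =====
-- port of MiesciSie(A, C)
def pvMiesciSie (A C : Int × Int) : Bool :=
  if C.1 ≥ A.1 ∧ C.2 ≤ A.2 then true else false

-- T[i]; exact for 0 ≤ i < len(T) — Pre_Klocki keeps every access of A in range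
def pvGetT (T : List (Int × Int)) (i : Nat) : Int × Int := T.getD i (0, 0)

-- DP[a][b]; exact for in-range indices (all reads of A are in range under Pre_Klocki)
def pvGet (M : List (List Int)) (a b : Nat) : Int := (M.getD a []).getD b 0

-- DP[i][j] = v (in-range list assignment, as in the Python)
def pvSet (M : List (List Int)) (i j : Nat) (v : Int) : List (List Int) :=
  M.set i ((M.getD i []).set j v)

-- body of the first loop: DP[0][i]=1; DP[i][0]=1; DP[1][i] = 2 if MiesciSie(T[0],T[1]) else 1
def pvInitStep (T : List (Int × Int)) (M : List (List Int)) (i : Nat) : List (List Int) :=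
  let M := pvSet M 0 i 1
  let M := pvSet M i 0 1
  if pvMiesciSie (pvGetT T 0) (pvGetT T 1) then pvSet M 1 i 2 else pvSet M 1 i 1

-- body of the innermost k-loop
def pvKStep (T : List (Int × Int)) (i j : Nat) (M : List (List Int)) (k : Nat) : List (List Int) :=
  let M := pvSet M i j (max (pvGet M i (j - 1)) (pvGet M (i - 1) j))
  if pvMiesciSie (pvGetT T i) (pvGetT T k) then
    pvSet M i j (max (pvGet M i j) (pvGet M k (j - 1)))
  else M

-- for k in range(i)
def pvJStep (T : List (Int × Int)) (i : Nat) (M : List (List Int)) (j : Nat) : List (List Int) :=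
  (List.range i).foldl (pvKStep T i j) M

-- for j in range(1, n)
def pvIStep (T : List (Int × Int)) (n : Nat) (M : List (List Int)) (i : Nat) : List (List Int) :=
  (List.range' 1 (n - 1)).foldl (pvJStep T i) M

def Klocki (T : List (Int × Int)) : Int :=
  let n := T.length
  let M0 : List (List Int) := List.replicate n (List.replicate n 0)  -- DP = [[0]*n for _ in range(n)]
  let M1 := (List.range n).foldl (pvInitStep T) M0                   -- for i in range(n): …
  let M2 := (List.range' 1 (n - 1)).foldl (pvIStep T n) M1           -- for i in range(1,n): …
  (n : Int) - pvGet M2 (n - 1) (n - 1)                               -- return n - DP[n-1][n-1]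

-- ===== PORT B =====
def Klocki_alt (T : List (Int × Int)) : Int := (T.length : Int) - 1

-- ===== PRECONDITION & SPEC =====
-- A reads T[1] in its first loop (and DP[-1][-1] of an empty table for n = 0), so it
-- raises IndexError for len(T) < 2; exactly those inputs are excluded.
def Pre_Klocki (T : List (Int × Int)) : Prop := 2 ≤ T.length
instance (T : List (Int × Int)) : Decidable (Pre_Klocki T) := by unfold Pre_Klocki; infer_instance
def pvWitness_Klocki : (List (Int × Int)) := [(0, 1), (0, 1)]

-- A raises IndexError whenever len(T) < 2; B returns len(T) - 1 there.
def Raises_Klocki (T : List (Int × Int)) : Prop := T.length < 2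
instance (T : List (Int × Int)) : Decidable (Raises_Klocki T) := by unfold Raises_Klocki; infer_instance
def pvRaiseWitness_Klocki : (List (Int × Int)) := [(0, 0)]
def pvRaiseWitnessOut_Klocki : Int := 0

def Spec_Klocki (T : List (Int × Int)) (out : Int) : Prop := out = Klocki_alt T
instance (T : List (Int × Int)) (out : Int) : Decidable (Spec_Klocki T out) := by unfold Spec_Klocki; infer_instance

-- ===== CLAIM (what is proved, stated in full; the proofs are below) =====
def Claim_equal_Klocki : Prop := ∀ (T : List (Int × Int)), Dom_Klocki T → Pre_Klocki T → Spec_Klocki T (Klocki T)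
def Claim_raises_Klocki : Prop := (∀ (T : List (Int × Int)), Dom_Klocki T → Raises_Klocki T → ¬ Pre_Klocki T) ∧ (Dom_Klocki (pvRaiseWitness_Klocki) ∧ Raises_Klocki (pvRaiseWitness_Klocki) ∧ Klocki_alt (pvRaiseWitness_Klocki) = pvRaiseWitnessOut_Klocki)

-- ===== LEMMAS AND PROOFS =====

-- the table stays an n × n matrix
def pvShape (n : Nat) (M : List (List Int)) : Prop :=
  M.length = n ∧ ∀ r ∈ M, r.length = n

-- invariant: rows 0..i-1 all ones (inside the n×n table), column 0 all ones, n×n shape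
def pvInv (n i : Nat) (M : List (List Int)) : Prop :=
  (∀ a b, a < i → b < n → pvGet M a b = 1) ∧ (∀ a, a < n → pvGet M a 0 = 1) ∧ pvShape n M

theorem pvRow_get (M : List (List Int)) (a : Nat) (ha : a < M.length) :
    M.getD a [] = M[a] := by
  simp [List.getD_eq_getElem?_getD, List.getElem?_eq_getElem ha]

theorem pvShape_set (n : Nat) (M : List (List Int)) (i j : Nat) (v : Int)
    (h : pvShape n M) : pvShape n (pvSet M i j v) := by
  obtain ⟨hlen, hrow⟩ := h
  refine ⟨by simp [pvSet, hlen], ?_⟩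
  intro r hr
  rcases Nat.lt_or_ge i M.length with hi | hi
  · rcases List.mem_or_eq_of_mem_set hr with hm | he
    · exact hrow r hm
    · subst he
      rw [pvRow_get M i hi, List.length_set]
      exact hrow _ (List.getElem_mem hi)
  · rw [pvSet, List.set_eq_of_length_le hi] at hr
    exact hrow r hr

theorem pvRowSet_get (M : List (List Int)) (i : Nat) (hi : i < M.length) (x : List Int) :
    (M.set i x).getD i [] = x := by
  rw [List.getD_eq_getElem?_getD, List.getElem?_set_self hi]; rfl

theorem pvGet_set_self (n : Nat) (M : List (List Int)) (i j : Nat) (v : Int)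
    (h : pvShape n M) (hi : i < n) (hj : j < n) : pvGet (pvSet M i j v) i j = v := by
  obtain ⟨hlen, hrow⟩ := h
  have hi' : i < M.length := by omega
  have hrl : (M.getD i []).length = n := by
    rw [pvRow_get M i hi']; exact hrow _ (List.getElem_mem hi')
  rw [pvGet, pvSet, pvRowSet_get M i hi', List.getD_eq_getElem?_getD,
    List.getElem?_set_self (hrl ▸ hj)]
  rfl

theorem pvGet_set_ne (M : List (List Int)) (i j a b : Nat) (v : Int)
    (h : ¬(a = i ∧ b = j)) : pvGet (pvSet M i j v) a b = pvGet M a b := by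
  by_cases hai : a = i
  · subst hai
    have hbj : j ≠ b := fun hb => h ⟨rfl, hb.symm⟩
    rcases Nat.lt_or_ge a M.length with ha | ha
    · simp only [pvGet, pvSet]
      rw [pvRowSet_get M a ha]
      simp only [List.getD_eq_getElem?_getD]
      rw [List.getElem?_set_ne hbj]
    · rw [pvSet, List.set_eq_of_length_le ha]
  · simp only [pvGet, pvSet, List.getD_eq_getElem?_getD]
    rw [List.getElem?_set_ne (fun he => hai he.symm)]

theorem pvSet_set (M : List (List Int)) (i j : Nat) (v w : Int) :
    pvSet (pvSet M i j v) i j w = pvSet M i j w := by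
  rcases Nat.lt_or_ge i M.length with hi | hi
  · simp only [pvSet, List.getD_eq_getElem?_getD, List.getElem?_set_self hi, Option.getD_some,
      List.set_set]
  · simp only [pvSet, List.set_eq_of_length_le hi]

-- the first loop establishes: row 0 ones, column 0 ones, shape (for m ≤ n)
theorem pvInit_rowcol (T : List (Int × Int)) (n : Nat) :
    ∀ m, m ≤ n →
      (∀ b, b < m → pvGet ((List.range m).foldl (pvInitStep T) (List.replicate n (List.replicate n 0))) 0 b = 1) ∧
      (∀ a, a < m → a ≠ 1 → pvGet ((List.range m).foldl (pvInitStep T) (List.replicate n (List.replicate n 0))) a 0 = 1) ∧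
      (2 ≤ m → pvGet ((List.range m).foldl (pvInitStep T) (List.replicate n (List.replicate n 0))) 1 0 = 1) ∧
      pvShape n ((List.range m).foldl (pvInitStep T) (List.replicate n (List.replicate n 0))) := by
  intro m
  induction m with
  | zero =>
    intro _
    refine ⟨by omega, by omega, by omega, ?_⟩
    exact ⟨by simp, fun r hr => by rw [List.eq_of_mem_replicate hr]; simp⟩
  | succ m ih =>
    intro hm
    obtain ⟨ih1, ih2, ih3, ihS⟩ := ih (by omega)
    rw [List.range_succ, List.foldl_append, List.foldl_cons, List.foldl_nil]
    set M := (List.range m).foldl (pvInitStep T) (List.replicate n (List.replicate n 0)) with hM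
    have hmn : m < n := by omega
    have key : ∀ c : Int,
        (∀ b, b < m + 1 → pvGet (pvSet (pvSet (pvSet M 0 m 1) m 0 1) 1 m c) 0 b = 1) ∧
        (∀ a, a < m + 1 → a ≠ 1 → pvGet (pvSet (pvSet (pvSet M 0 m 1) m 0 1) 1 m c) a 0 = 1) ∧
        (2 ≤ m + 1 → pvGet (pvSet (pvSet (pvSet M 0 m 1) m 0 1) 1 m c) 1 0 = 1) ∧
        pvShape n (pvSet (pvSet (pvSet M 0 m 1) m 0 1) 1 m c) := by
      intro c
      have hS1 : pvShape n (pvSet M 0 m 1) := pvShape_set n M 0 m 1 ihS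
      have hS2 : pvShape n (pvSet (pvSet M 0 m 1) m 0 1) := pvShape_set n _ m 0 1 hS1
      refine ⟨?_, ?_, ?_, pvShape_set n _ 1 m c hS2⟩
      · intro b hb
        rcases Nat.lt_or_ge b m with h | h
        · rw [pvGet_set_ne _ _ _ _ _ _ (by omega), pvGet_set_ne _ _ _ _ _ _ (by omega),
            pvGet_set_ne _ _ _ _ _ _ (by omega)]
          exact ih1 b h
        · have hbm : b = m := by omega
          rw [hbm]
          rcases Nat.eq_zero_or_pos m with h0 | h0
          · -- m = 0: the write (m,0) = (0,0) lands on the tracked cell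
            subst h0
            rw [pvGet_set_ne _ _ _ _ _ _ (by omega)]
            exact pvGet_set_self n _ 0 0 1 hS1 (by omega) (by omega)
          · rw [pvGet_set_ne _ _ _ _ _ _ (by omega), pvGet_set_ne _ _ _ _ _ _ (by omega)]
            exact pvGet_set_self n M 0 m 1 ihS (by omega) hmn
      · intro a ha ha1
        rcases Nat.lt_or_ge a m with h | h
        · rw [pvGet_set_ne _ _ _ _ _ _ (by omega), pvGet_set_ne _ _ _ _ _ _ (by omega)]
          rcases Nat.eq_zero_or_pos m with h0 | h0
          · omega
          · rw [pvGet_set_ne _ _ _ _ _ _ (by omega)]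
            exact ih2 a h ha1
        · have ham : a = m := by omega
          rw [ham]
          rw [pvGet_set_ne _ _ _ _ _ _ (by omega)]
          exact pvGet_set_self n _ m 0 1 hS1 (by omega) (by omega)
      · intro h2
        have h1m : (1 : Nat) ≤ m := by omega
        rcases Nat.eq_or_lt_of_le h1m with h1 | h1
        · -- m = 1: the write (m,0) = (1,0) is the tracked cell
          subst h1
          rw [pvGet_set_ne _ _ _ _ _ _ (by omega)]
          exact pvGet_set_self n _ 1 0 1 hS1 (by omega) (by omega)
        · rw [pvGet_set_ne _ _ _ _ _ _ (by omega), pvGet_set_ne _ _ _ _ _ _ (by omega),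
            pvGet_set_ne _ _ _ _ _ _ (by omega)]
          exact ih3 (by omega)
    simp only [pvInitStep]
    split
    · exact key 2
    · exact key 1

-- one k-iteration, under all-ones reads, is exactly "write 1 at (i, j)"
theorem pvKStep_eq (T : List (Int × Int)) (n i j k : Nat) (M : List (List Int))
    (hS : pvShape n M) (hin : i < n) (hjn : j < n) (hk : k < i) (_hj : 1 ≤ j)
    (h1 : pvGet M i (j - 1) = 1) (h2 : pvGet M (i - 1) j = 1) (h3 : pvGet M k (j - 1) = 1) :
    pvKStep T i j M k = pvSet M i j 1 := by
  simp only [pvKStep, h1, h2, max_self]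
  split
  · rw [pvGet_set_self n M i j 1 hS hin hjn, pvGet_set_ne _ _ _ _ _ _ (by omega), h3,
      max_self, pvSet_set]
  · rfl

-- the whole k-loop (nonempty, all k < i) is "write 1 at (i, j)"
theorem pvKFold_eq (T : List (Int × Int)) (n i j : Nat)
    (hi : 1 ≤ i) (hin : i < n) (hj : 1 ≤ j) (hjn : j < n) :
    ∀ (L : List Nat) (M : List (List Int)), L ≠ [] → (∀ k ∈ L, k < i) →
      (∀ a b, a < i → b < n → pvGet M a b = 1) → pvGet M i (j - 1) = 1 → pvShape n M →
      L.foldl (pvKStep T i j) M = pvSet M i j 1 := by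
  intro L
  induction L with
  | nil => intro M h; exact absurd rfl h
  | cons k L ih =>
    intro M _ hmem hrows hleft hS
    have hk : k < i := hmem k (by simp)
    have hstep : pvKStep T i j M k = pvSet M i j 1 :=
      pvKStep_eq T n i j k M hS hin hjn hk hj hleft
        (hrows (i - 1) j (by omega) hjn) (hrows k (j - 1) hk (by omega))
    rcases L with _ | ⟨k', L'⟩
    · simpa using hstep
    · have hrows' : ∀ a b, a < i → b < n → pvGet (pvSet M i j 1) a b = 1 := by
        intro a b ha hb
        rw [pvGet_set_ne _ _ _ _ _ _ (by omega)]; exact hrows a b ha hb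
      have hleft' : pvGet (pvSet M i j 1) i (j - 1) = 1 := by
        rw [pvGet_set_ne _ _ _ _ _ _ (by omega)]; exact hleft
      calc (k :: k' :: L').foldl (pvKStep T i j) M
          = (k' :: L').foldl (pvKStep T i j) (pvSet M i j 1) := by
            simp only [List.foldl_cons, hstep]
        _ = pvSet (pvSet M i j 1) i j 1 :=
            ih (pvSet M i j 1) (by simp) (fun x hx => hmem x (by simp [hx])) hrows' hleft'
              (pvShape_set n M i j 1 hS)
        _ = pvSet M i j 1 := pvSet_set M i j 1 1

-- the whole j-loop for one row i turns pvInv n i into pvInv n (i+1)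
theorem pvJFold_inv (T : List (Int × Int)) (n i : Nat)
    (hi : 1 ≤ i) (hin : i < n) (M : List (List Int)) (h : pvInv n i M) :
    pvInv n (i + 1) (pvIStep T n M i) := by
  obtain ⟨hrows, hcol, hS⟩ := h
  have main : ∀ t, t ≤ n - 1 →
      (∀ a b, a < i → b < n → pvGet ((List.range' 1 t).foldl (pvJStep T i) M) a b = 1) ∧
      (∀ a, a < n → pvGet ((List.range' 1 t).foldl (pvJStep T i) M) a 0 = 1) ∧
      (∀ j, 1 ≤ j → j ≤ t → pvGet ((List.range' 1 t).foldl (pvJStep T i) M) i j = 1) ∧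
      pvShape n ((List.range' 1 t).foldl (pvJStep T i) M) := by
    intro t
    induction t with
    | zero => intro _; exact ⟨hrows, hcol, by omega, hS⟩
    | succ t ih =>
      intro ht
      obtain ⟨ih1, ih2, ih3, ihS⟩ := ih (by omega)
      rw [List.range'_1_concat, List.foldl_append, List.foldl_cons, List.foldl_nil]
      set Mt := (List.range' 1 t).foldl (pvJStep T i) M with hMt
      have hfold : pvJStep T i Mt (1 + t) = pvSet Mt i (1 + t) 1 := by
        have hleft : pvGet Mt i (1 + t - 1) = 1 := by
          rcases Nat.eq_zero_or_pos t with h0 | h0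
          · subst h0; exact ih2 i hin
          · have he : (1 + t - 1) = t := by omega
            rw [he]; exact ih3 t h0 le_rfl
        exact pvKFold_eq T n i (1 + t) hi hin (by omega) (by omega)
          (List.range i) Mt
          (by intro h; have := congrArg List.length h; simp at this; omega)
          (fun k hk => List.mem_range.mp hk) ih1 hleft ihS
      rw [hfold]
      refine ⟨?_, ?_, ?_, pvShape_set n Mt i (1 + t) 1 ihS⟩
      · intro a b ha hb
        rw [pvGet_set_ne _ _ _ _ _ _ (by omega)]; exact ih1 a b ha hb
      · intro a ha
        rw [pvGet_set_ne _ _ _ _ _ _ (by omega)]; exact ih2 a ha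
      · intro j hj1 hj2
        rcases Nat.lt_or_ge j (1 + t) with h | h
        · rw [pvGet_set_ne _ _ _ _ _ _ (by omega)]; exact ih3 j hj1 (by omega)
        · have he : j = 1 + t := by omega
          subst he; exact pvGet_set_self n Mt i (1 + t) 1 ihS hin (by omega)
  obtain ⟨m1, m2, m3, mS⟩ := main (n - 1) le_rfl
  refine ⟨?_, m2, mS⟩
  intro a b ha hb
  rcases Nat.lt_or_ge a i with h | h
  · exact m1 a b h hb
  · have hai : a = i := by omega
    rcases Nat.eq_zero_or_pos b with h0 | h0
    · subst h0; rw [hai]; exact m2 i hin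
    · rw [hai]; exact m3 b h0 (by omega)

-- the outer i-loop: after processing rows 1..s the first 1+s rows are all ones
theorem pvIFold_inv (T : List (Int × Int)) (n : Nat) (M : List (List Int))
    (h : pvInv n 1 M) :
    ∀ s, s ≤ n - 1 → pvInv n (1 + s) ((List.range' 1 s).foldl (pvIStep T n) M) := by
  intro s
  induction s with
  | zero => intro _; simpa using h
  | succ s ih =>
    intro hs
    rw [List.range'_1_concat, List.foldl_append, List.foldl_cons, List.foldl_nil]
    have := pvJFold_inv T n (1 + s) (by omega) (by omega)
      ((List.range' 1 s).foldl (pvIStep T n) M) (ih (by omega))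
    simpa [Nat.add_comm, pvIStep] using this

-- ===== VERDICT (by name: the statement is the Claim_ definition above) =====
theorem Klocki_spec : Claim_equal_Klocki := by
  intro T _ hpre
  unfold Spec_Klocki Klocki Klocki_alt
  set n := T.length with hn
  have hn2 : 2 ≤ n := hpre
  have hinit := pvInit_rowcol T n n le_rfl
  have hinv1 : pvInv n 1 ((List.range n).foldl (pvInitStep T) (List.replicate n (List.replicate n 0))) := by
    refine ⟨?_, ?_, hinit.2.2.2⟩
    · intro a b ha hb
      have : a = 0 := by omega
      subst this; exact hinit.1 b hb
    · intro a ha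
      rcases Nat.decEq a 1 with h1 | h1
      · exact hinit.2.1 a ha h1
      · subst h1; exact hinit.2.2.1 hn2
  have hfin := pvIFold_inv T n _ hinv1 (n - 1) le_rfl
  have hone : pvGet ((List.range' 1 (n - 1)).foldl (pvIStep T n)
      ((List.range n).foldl (pvInitStep T) (List.replicate n (List.replicate n 0))))
      (n - 1) (n - 1) = 1 :=
    hfin.1 (n - 1) (n - 1) (by omega) (by omega)
  simp only [hone]

theorem Klocki_raises : Claim_raises_Klocki := by
  unfold Claim_raises_Klocki
  exact ⟨by intro T _ h; unfold Raises_Klocki at h; unfold Pre_Klocki; omega, by decide⟩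

-- self-check that the crash-fix witness value is the one Klocki_raises certifies
theorem Klocki_raises_witness_ok :
    Klocki_alt pvRaiseWitness_Klocki = pvRaiseWitnessOut_Klocki :=
  Klocki_raises.2.2.2
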